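-- pv_equiv track=rewrite | github.com/Seungmin-develop/Algorithm_Coding_Test | PROGRAMMERS/문자열 압축.py | solution
-- ===== SOURCE A (Python) =====
-- def solution(s):
--     answer = len(s)
--     # i는 끊는 단위 개수
--     for i in range(1, len(s)+1):
--         # 끊는 개수마다의 정답을 저장하는 변수 temp_answer
--         temp_answer = len(s)
--         # 끊은 부분 문자열을 저장하는 배열 slice_arr
--         slice_arr = []
--         # i 글자만큼 문자열을 끊어서 slice_arr에 저장
--         for j in range(0, len(s)-i+1, i):
--             slice_arr.append(list(s[j:j+i]))
--
--         # 연속해서 같은 부분 문자열이 나오는지 체크하는 변수와 몇 번 연속인지 저장하는 변수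
--         conti_flag = False
--         conti_count = 1
--         for k in range(1, len(slice_arr)):
--             # 만약 처음으로 앞 뒤의 부분 문자열이 같으면
--             if slice_arr[k] == slice_arr[k-1] and conti_flag == False:
--                 temp_answer -= (i-1)
--                 conti_flag = True
--                 conti_count += 1
--             # 계속해서 부분 문자열이 같은 경우
--             elif slice_arr[k] == slice_arr[k-1] and conti_flag == True:
--                 temp_answer -= i
--                 conti_count += 1
--                 # 만약 연속하는 횟수가 10, 100, 1000의 경우 10a, 100a, 1000a와 같이 결과가 한자리 늘어나기 때문에 예외 처리를 해주어야함
--                 if conti_count in (10,100,1000):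
--                     temp_answer += 1
--             # 앞의 부분 문자열과 다른 경우
--             else:
--                 conti_flag = False
--                 conti_count = 1
--
--         answer = min(answer, temp_answer)
--
--     return answer
-- ===== SOURCE B (Python) =====
-- def _cost(i, c):
--     # compressed cost of a run of c equal chunks of size i; the run-length digit
--     # count uses the 10/100/1000 thresholds (capped at 4 digits)
--     if c == 1:
--         return i
--     return i + 1 + (c >= 10) + (c >= 100) + (c >= 1000)
--
--
-- def solution(s):
--     n = len(s)
--     best = n
--     for i in range(1, n + 1):
--         m = n // i  # number of full chunks of size i
--         # positions where the chunk differs from its predecessor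
--         breaks = [k for k in range(1, m) if s[k * i:(k + 1) * i] != s[(k - 1) * i:k * i]]
--         bounds = [0] + breaks + [m]
--         # run lengths are the gaps between consecutive break positions
--         total = n - i * m + sum(_cost(i, b - a) for a, b in zip(bounds, bounds[1:]))
--         best = min(best, total)
--     return best
-- ===== Notes on version B (the rewrite author's own statement) =====
-- stated objective: alternative
-- what changed: A scans adjacent chunks with a continuation flag and running count, subtracting i-1 or i per repeated chunk and patching +1 at counts 10/100/1000; B never tracks a run in progress: it compares string slices at distance i to build the list of break positions, recovers each run length as the gap between consecutive breaks (zip of bounds with its tail), and sums each run's cost i + digit count (with the same 10/100/1000 thresholds) onto the uncompressed leftover. B also never materializes A's per-chunk character lists, comparing string slices directly.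
import Mathlib
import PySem

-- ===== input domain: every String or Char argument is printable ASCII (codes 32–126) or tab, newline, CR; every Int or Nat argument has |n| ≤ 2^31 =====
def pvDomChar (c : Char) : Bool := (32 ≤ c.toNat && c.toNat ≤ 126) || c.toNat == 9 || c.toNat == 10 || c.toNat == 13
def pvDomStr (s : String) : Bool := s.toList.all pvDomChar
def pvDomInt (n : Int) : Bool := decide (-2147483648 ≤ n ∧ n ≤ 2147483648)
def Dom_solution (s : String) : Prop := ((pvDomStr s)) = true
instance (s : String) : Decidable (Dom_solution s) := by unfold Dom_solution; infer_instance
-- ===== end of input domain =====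

-- B replaces A's flag/delta subtraction loop (with its 10/100/1000 "+1" adjustments) by computing
-- break positions between unequal adjacent chunks and summing run costs over the gaps between
-- consecutive breaks, comparing slices directly instead of materializing per-chunk char lists
-- (a timing run measured B faster); objective: alternative decomposition.


-- ===== PORT A =====
def solution (s : String) : Int :=
  let n : Int := PySem.Str.len s
  (PySem.List.pyRange 1 (n + 1)).foldl (fun answer i =>
    let sliceArr : List (List Char) :=
      (PySem.List.pyRange 0 (n - i + 1) i).foldl
        (fun acc j => acc ++ [(PySem.Str.slice s (some j) (some (j + i))).toList]) []
    let st : Int × Bool × Int :=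
      (PySem.List.pyRange 1 ((sliceArr.length : Int))).foldl
        (fun st k =>
          if (PySem.List.pyGetD sliceArr k [] == PySem.List.pyGetD sliceArr (k - 1) []) && (st.2.1 == false) then
            (st.1 - (i - 1), true, st.2.2 + 1)
          else if (PySem.List.pyGetD sliceArr k [] == PySem.List.pyGetD sliceArr (k - 1) []) && (st.2.1 == true) then
            (if (st.2.2 + 1 == 10) || (st.2.2 + 1 == 100) || (st.2.2 + 1 == 1000) then st.1 - i + 1 else st.1 - i,
             true, st.2.2 + 1)
          else (st.1, false, 1))
        (n, false, 1)
    min answer st.1) n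

-- ===== PORT B =====
-- Source B's _cost: compressed cost of a run of c equal chunks of size i
def bCost (i : Int) (c : Int) : Int :=
  if c = 1 then i
  else i + 1 + (if 10 ≤ c then 1 else 0) + (if 100 ≤ c then 1 else 0) + (if 1000 ≤ c then 1 else 0)

def solution_alt (s : String) : Int :=
  let n : Int := PySem.Str.len s
  (PySem.List.pyRange 1 (n + 1)).foldl (fun best i =>
    let m : Int := PySem.Int.floordiv n i
    let breaks : List Int :=
      (PySem.List.pyRange 1 m).filter
        (fun k => !(PySem.Str.slice s (some (k * i)) (some ((k + 1) * i))
                    == PySem.Str.slice s (some ((k - 1) * i)) (some (k * i))))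
    let bounds : List Int := 0 :: breaks ++ [m]
    let total : Int := n - i * m
      + ((bounds.zip (PySem.List.slice bounds (some 1) none)).map
          (fun p => bCost i (p.2 - p.1))).sum
    min best total) n

-- ===== PRECONDITION & SPEC =====
def Spec_solution (s : String) (out : Int) : Prop := out = solution_alt s
instance (s : String) (out : Int) : Decidable (Spec_solution s out) := by unfold Spec_solution; infer_instance

-- ===== CLAIM (what is proved, stated in full; the proofs are below) =====
def Claim_equal_solution : Prop := ∀ (s : String), Dom_solution s → Spec_solution s (solution s)

-- ===== LEMMAS AND PROOFS =====

-- Nat-argument version of the run cost, convenient for the invariants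
def bCostNat (i : Int) (c : Nat) : Int :=
  if c = 1 then i
  else i + 1 + (if 10 ≤ c then 1 else 0) + (if 100 ≤ c then 1 else 0) + (if 1000 ≤ c then 1 else 0)

theorem bCost_natSub (i : Int) (c k : Nat) (h : c < k) :
    bCost i ((k : Int) - (c : Int)) = bCostNat i (k - c) := by
  have harg : (k : Int) - (c : Int) = ((k - c : Nat) : Int) := by omega
  rw [harg]
  unfold bCost bCostNat
  have h1 : (((k - c : Nat) : Int) = 1) ↔ (k - c = 1) := by omega
  have h10 : ((10 : Int) ≤ ((k - c : Nat) : Int)) ↔ (10 ≤ k - c) := by omega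
  have h100 : ((100 : Int) ≤ ((k - c : Nat) : Int)) ↔ (100 ≤ k - c) := by omega
  have h1000 : ((1000 : Int) ≤ ((k - c : Nat) : Int)) ↔ (1000 ≤ k - c) := by omega
  simp only [h1, h10, h100, h1000]

-- total compressed cost of a chunk list, run by run (the common value both programs compute)
def bGroup {α : Type} [BEq α] (i : Int) : List α → Int
  | [] => 0
  | x :: xs =>
      bCostNat i (1 + (xs.takeWhile (fun y => y == x)).length)
        + bGroup i (xs.dropWhile (fun y => y == x))
termination_by l => l.length
decreasing_by simpa using Nat.lt_succ_of_le (List.length_dropWhile_le _ _)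

-- ---- A-side machinery: A's indexed flag/count loop computes n - i*m + bGroup ----

-- A's inner-loop step, abstracted over the two adjacent chunks it compares
def stepA {α : Type} [BEq α] (i : Int) (st : Int × Bool × Int) (prev y : α) : Int × Bool × Int :=
  if (y == prev) && (st.2.1 == false) then
    (st.1 - (i - 1), true, st.2.2 + 1)
  else if (y == prev) && (st.2.1 == true) then
    (if (st.2.2 + 1 == 10) || (st.2.2 + 1 == 100) || (st.2.2 + 1 == 1000) then st.1 - i + 1 else st.1 - i,
     true, st.2.2 + 1)
  else (st.1, false, 1)

-- walking A's step over the adjacent pairs of prev :: l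
def pairWalk {α : Type} [BEq α] (i : Int) : α → List α → (Int × Bool × Int) → (Int × Bool × Int)
  | _, [], st => st
  | prev, y :: ys, st => pairWalk i y ys (stepA i st prev y)

-- total amount A's loop subtracts for one completed run of length c
def subA (i : Int) (c : Nat) : Int := i * c - bCostNat i c

theorem subA_one (i : Int) : subA i 1 = 0 := by simp [subA, bCostNat]

theorem subA_two (i : Int) : subA i 2 = i - 1 := by norm_num [subA, bCostNat]; ring

theorem subA_succ (i : Int) (c : Nat) (hc : 2 ≤ c) :
    subA i (c + 1) = subA i c + i - (if c + 1 = 10 ∨ c + 1 = 100 ∨ c + 1 = 1000 then 1 else 0) := by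
  unfold subA bCostNat
  push_cast
  simp only [mul_add]
  split_ifs <;> omega

theorem getD_append_left {α : Type} (xs zs : List α) (m : Nat) (h : m < xs.length) (d : α) :
    (xs ++ zs).getD m d = xs.getD m d := by
  simp [List.getD_eq_getElem?_getD, List.getElem?_append_left h]

theorem cons_getD_length {α : Type} (x : α) (ys : List α) (d : α) :
    (x :: ys).getD ys.length d = ys.getLastD x := by
  induction ys generalizing x with
  | nil => rfl
  | cons y ys ih => rw [List.getLastD_cons]; simpa [List.getD_cons_succ] using ih y

theorem pairWalk_append_singleton {α : Type} [BEq α] (i : Int) (ys : List α) :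
    ∀ (x z : α) (st : Int × Bool × Int),
      pairWalk i x (ys ++ [z]) st = stepA i (pairWalk i x ys st) (ys.getLastD x) z := by
  induction ys with
  | nil => intro x z st; rfl
  | cons y ys ih => intro x z st; rw [List.getLastD_cons]; exact ih y z (stepA i st x y)

-- A's index-based loop over adjacent pairs is the structural walk
theorem foldA_eq_pairWalk {α : Type} [BEq α] (i : Int) (xs : List α) (x : α) (d : α)
    (st : Int × Bool × Int) :
    (PySem.List.pyRange 1 (((x :: xs).length : Int))).foldl
      (fun st k => stepA i st (PySem.List.pyGetD (x :: xs) (k - 1) d) (PySem.List.pyGetD (x :: xs) k d)) st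
    = pairWalk i x xs st := by
  induction xs using List.reverseRecOn with
  | nil =>
      have h1 : (((x :: ([] : List α)).length : Nat) : Int) = 1 := by simp
      rw [h1, show PySem.List.pyRange 1 1 = ([] : List Int) from by decide]
      rfl
  | append_singleton ys z ih =>
      have hlen : (((x :: (ys ++ [z])).length : Nat) : Int) = ((ys.length + 1 : Nat) : Int) + 1 := by
        push_cast [List.length_cons, List.length_append]; simp
      rw [hlen, PySem.List.pyRange_one_succ_right (by omega), List.foldl_append]
      have hcongr :
          (PySem.List.pyRange 1 ((ys.length + 1 : Nat) : Int)).foldl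
            (fun st k => stepA i st (PySem.List.pyGetD (x :: (ys ++ [z])) (k - 1) d)
              (PySem.List.pyGetD (x :: (ys ++ [z])) k d)) st
          = (PySem.List.pyRange 1 ((ys.length + 1 : Nat) : Int)).foldl
            (fun st k => stepA i st (PySem.List.pyGetD (x :: ys) (k - 1) d)
              (PySem.List.pyGetD (x :: ys) k d)) st := by
        apply PySem.List.foldl_congr_mem
        intro acc k hk
        rw [PySem.List.mem_pyRange_one] at hk
        obtain ⟨m, rfl⟩ : ∃ m : Nat, k = (m : Int) := ⟨k.toNat, by omega⟩
        have hm : 1 ≤ m ∧ m < ys.length + 1 := by omega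
        have hk2 : (m : Int) - 1 = (((m - 1 : Nat)) : Int) := by omega
        have hxyz : x :: (ys ++ [z]) = (x :: ys) ++ [z] := by simp
        rw [hk2, hxyz, PySem.List.pyGetD_natCast, PySem.List.pyGetD_natCast,
          PySem.List.pyGetD_natCast, PySem.List.pyGetD_natCast,
          getD_append_left _ _ _ (by simp; omega) d,
          getD_append_left _ _ _ (by simp; omega) d]
      rw [hcongr]
      simp only [List.length_cons] at ih
      rw [ih]
      simp only [List.foldl_cons, List.foldl_nil]
      rw [pairWalk_append_singleton]
      congr 1
      · have h2 : ((ys.length + 1 : Nat) : Int) - 1 = ((ys.length : Nat) : Int) := by push_cast; ring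
        rw [h2, PySem.List.pyGetD_natCast]
        have hxyz : x :: (ys ++ [z]) = (x :: ys) ++ [z] := by simp
        rw [hxyz, getD_append_left _ _ _ (by simp) d, cons_getD_length]
      · rw [PySem.List.pyGetD_natCast]
        have h3 : (x :: (ys ++ [z])).getD (ys.length + 1) d = z := by
          simp [List.getD_eq_getElem?_getD]
        rw [h3]

-- the loop invariant: temp after the walk, given that the run in progress already has c members
theorem pairWalk_fst {α : Type} [BEq α] [LawfulBEq α] (i : Int) :
    ∀ (rest : List α) (prev : α) (temp : Int) (c : Nat), 1 ≤ c →
      (pairWalk i prev rest (temp, decide (2 ≤ c), (c : Int))).1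
        = temp - (subA i (c + (rest.takeWhile (fun y => y == prev)).length) - subA i c)
            - (i * (((rest.dropWhile (fun y => y == prev)).length : Nat) : Int)
               - bGroup i (rest.dropWhile (fun y => y == prev))) := by
  intro rest
  induction rest with
  | nil => intro prev temp c hc; simp [pairWalk, bGroup]
  | cons y ys ih =>
      intro prev temp c hc
      by_cases hy : y = prev
      · subst hy
        simp only [List.takeWhile_cons, beq_self_eq_true, if_pos, List.dropWhile_cons]
        by_cases hc2 : 2 ≤ c
        · have hstep : stepA i (temp, decide (2 ≤ c), (c : Int)) y y
              = (temp - (subA i (c + 1) - subA i c), decide (2 ≤ c + 1), ((c + 1 : Nat) : Int)) := by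
            unfold stepA
            rw [show decide (2 ≤ c) = true from by simp [hc2]]
            simp only [beq_self_eq_true, Bool.true_and, beq_iff_eq,
              Bool.true_eq_false, Bool.or_eq_true, if_false, if_true,
              Bool.and_self, Prod.mk.injEq]
            refine ⟨?_, ?_, by push_cast; ring⟩
            · rw [subA_succ i c hc2]
              by_cases hm : c + 1 = 10 ∨ c + 1 = 100 ∨ c + 1 = 1000
              · rw [if_pos (by omega), if_pos hm]; ring
              · rw [if_neg (by omega), if_neg hm]; ring
            · have h3 : 2 ≤ c + 1 := by omega
              simp [h3]
          rw [pairWalk, hstep, ih y _ (c + 1) (by omega)]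
          simp only [List.length_cons]
          rw [show (ys.takeWhile (fun b => b == y)).length + 1
              = 1 + (ys.takeWhile (fun b => b == y)).length from by omega]
          rw [show c + (1 + (ys.takeWhile (fun b => b == y)).length)
              = c + 1 + (ys.takeWhile (fun b => b == y)).length from by omega]
          omega
        · have hc1 : c = 1 := by omega
          subst hc1
          have hstep : stepA i (temp, decide (2 ≤ 1), ((1 : Nat) : Int)) y y
              = (temp - (i - 1), decide (2 ≤ 2), ((2 : Nat) : Int)) := by
            unfold stepA; norm_num
          rw [pairWalk, hstep, ih y _ 2 (by omega)]
          rw [subA_one, subA_two]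
          simp only [List.length_cons]
          rw [show (ys.takeWhile (fun b => b == y)).length + 1
              = 1 + (ys.takeWhile (fun b => b == y)).length from by omega]
          rw [show (2 : Nat) + (ys.takeWhile (fun b => b == y)).length
              = 1 + (1 + (ys.takeWhile (fun b => b == y)).length) from by omega]
          omega
      · have hby : (y == prev) = false := by simp [hy]
        simp only [List.takeWhile_cons, hby, List.dropWhile_cons, Bool.false_eq_true, if_false]
        have hstep : stepA i (temp, decide (2 ≤ c), (c : Int)) prev y
            = (temp, decide (2 ≤ 1), ((1 : Nat) : Int)) := by
          unfold stepA; rw [hby]; norm_num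
        rw [pairWalk, hstep, ih y temp 1 (by omega)]
        rw [subA_one]
        have hsplit := congrArg List.length (List.takeWhile_append_dropWhile (p := fun b => b == y) (l := ys))
        simp only [List.length_append] at hsplit
        rw [show bGroup i (y :: ys) = bCostNat i (1 + (ys.takeWhile (fun b => b == y)).length)
              + bGroup i (ys.dropWhile (fun b => b == y)) from by rw [bGroup]]
        have hsubA : subA i (1 + (ys.takeWhile (fun b => b == y)).length)
            = i * ((1 + (ys.takeWhile (fun b => b == y)).length : Nat) : Int)
              - bCostNat i (1 + (ys.takeWhile (fun b => b == y)).length) := rfl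
        simp only [List.length_nil, Nat.add_zero, List.length_cons] at *
        rw [hsubA]
        have hlen2 : ((ys.length + 1 : Nat) : Int)
            = (((ys.takeWhile (fun b => b == y)).length : Nat) : Int)
              + (((ys.dropWhile (fun b => b == y)).length : Nat) : Int) + 1 := by
          omega
        rw [hlen2]
        push_cast
        ring_nf

-- bGroup only looks at equalities, so mapping through a == -preserving function keeps its value
theorem bGroup_map {α β : Type} [BEq α] [BEq β] (f : α → β)
    (hf : ∀ a b : α, (f a == f b) = (a == b)) (i : Int) (l : List α) :
    bGroup i (l.map f) = bGroup i l := by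
  induction l using bGroup.induct (α := α) with
  | case1 => simp [bGroup]
  | case2 x xs ih =>
      rw [List.map_cons, bGroup, bGroup]
      have hp : (fun y => y == f x) ∘ f = (fun y => y == x) := by
        funext a; simp [hf]
      rw [List.takeWhile_map, List.dropWhile_map, hp, List.length_map, ih]

theorem toList_beq (a b : String) : (a.toList == b.toList) = (a == b) := by
  by_cases h : a = b
  · subst h; simp
  · have h2 : ¬ (a.toList = b.toList) := fun hh => h (String.toList_inj.mp hh)
    simp [h, h2]

-- a full walk started in the reset state computes n - i*m + bGroup
theorem walk_total {α : Type} [BEq α] [LawfulBEq α] (i n : Int) (x : α) (xs : List α) :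
    (pairWalk i x xs (n, false, 1)).1
      = n - i * (((x :: xs).length : Nat) : Int) + bGroup i (x :: xs) := by
  have h0 : ((n, false, (1 : Int)) : Int × Bool × Int)
      = (n, decide (2 ≤ (1 : Nat)), ((1 : Nat) : Int)) := by norm_num
  rw [h0, pairWalk_fst i xs x n 1 (by omega), subA_one]
  rw [show bGroup i (x :: xs) = bCostNat i (1 + (xs.takeWhile (fun y => y == x)).length)
        + bGroup i (xs.dropWhile (fun y => y == x)) from by rw [bGroup]]
  have hsplit := congrArg List.length (List.takeWhile_append_dropWhile (p := fun b => b == x) (l := xs))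
  simp only [List.length_append] at hsplit
  have hsubA : subA i (1 + (xs.takeWhile (fun y => y == x)).length)
      = i * ((1 + (xs.takeWhile (fun y => y == x)).length : Nat) : Int)
        - bCostNat i (1 + (xs.takeWhile (fun y => y == x)).length) := rfl
  rw [hsubA]
  simp only [List.length_cons]
  have hlen2 : ((xs.length + 1 : Nat) : Int)
      = (((xs.takeWhile (fun y => y == x)).length : Nat) : Int)
        + (((xs.dropWhile (fun y => y == x)).length : Nat) : Int) + 1 := by
    omega
  rw [hlen2]
  push_cast
  ring_nf

-- the port's inline loop body is exactly stepA
theorem foldA_inline (i : Int) (xs : List (List Char)) (x : List Char) (st : Int × Bool × Int) :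
    (PySem.List.pyRange 1 (((x :: xs).length : Int))).foldl
      (fun st k =>
        if (PySem.List.pyGetD (x :: xs) k [] == PySem.List.pyGetD (x :: xs) (k - 1) []) && (st.2.1 == false) then
          (st.1 - (i - 1), true, st.2.2 + 1)
        else if (PySem.List.pyGetD (x :: xs) k [] == PySem.List.pyGetD (x :: xs) (k - 1) []) && (st.2.1 == true) then
          (if (st.2.2 + 1 == 10) || (st.2.2 + 1 == 100) || (st.2.2 + 1 == 1000) then st.1 - i + 1 else st.1 - i,
           true, st.2.2 + 1)
        else (st.1, false, 1)) st
    = pairWalk i x xs st := foldA_eq_pairWalk i xs x [] st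

-- ---- B-side machinery: break positions + gap sums compute bGroup ----

-- break positions of the chunk list, walked structurally (k = index of the next chunk)
def breaksAux {α : Type} [BEq α] : α → List α → Nat → List Int
  | _, [], _ => []
  | prev, y :: ys, k => if y == prev then breaksAux y ys (k + 1) else (k : Int) :: breaksAux y ys (k + 1)

-- the gap-cost sum over a bounds list (Source B's zip(bounds, bounds[1:]) comprehension)
def diffSum (i : Int) (l : List Int) : Int :=
  ((l.zip l.tail).map (fun p => bCost i (p.2 - p.1))).sum

theorem diffSum_cons_cons (i a b : Int) (l : List Int) :
    diffSum i (a :: b :: l) = bCost i (b - a) + diffSum i (b :: l) := by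
  simp [diffSum, List.zip]

theorem getD_append_length {α : Type} (pre : List α) (y : α) (ys : List α) (d : α) :
    (pre ++ y :: ys).getD pre.length d = y := by
  simp [List.getD_eq_getElem?_getD]

-- B's filter over index positions equals the structural break walk
theorem filter_eq_breaksAux {α : Type} [BEq α] (d : α) :
    ∀ (xs pre : List α) (prev : α),
      ((PySem.List.pyRange ((pre.length + 1 : Nat) : Int) (((pre ++ prev :: xs).length : Nat) : Int)).filter
        (fun j => !(PySem.List.pyGetD (pre ++ prev :: xs) j d
                    == PySem.List.pyGetD (pre ++ prev :: xs) (j - 1) d)))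
      = breaksAux prev xs (pre.length + 1) := by
  intro xs
  induction xs with
  | nil =>
      intro pre prev
      rw [show (((pre ++ prev :: ([] : List α)).length : Nat) : Int) = ((pre.length + 1 : Nat) : Int) from by
        simp]
      rw [PySem.List.pyRange_one_eq_nil (le_refl _)]
      rfl
  | cons y ys ih =>
      intro pre prev
      have hlt : ((pre.length + 1 : Nat) : Int) < (((pre ++ prev :: y :: ys).length : Nat) : Int) := by
        push_cast [List.length_append, List.length_cons]; omega
      rw [PySem.List.pyRange_one_cons hlt, List.filter_cons]
      have hre : pre ++ prev :: y :: ys = (pre ++ [prev]) ++ y :: ys := by simp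
      have hgetk : PySem.List.pyGetD (pre ++ prev :: y :: ys) ((pre.length + 1 : Nat) : Int) d = y := by
        rw [PySem.List.pyGetD_natCast, hre,
          show pre.length + 1 = (pre ++ [prev]).length from by simp,
          getD_append_length]
      have hgetk1 : PySem.List.pyGetD (pre ++ prev :: y :: ys) (((pre.length + 1 : Nat) : Int) - 1) d = prev := by
        rw [show ((pre.length + 1 : Nat) : Int) - 1 = ((pre.length : Nat) : Int) from by push_cast; ring,
          PySem.List.pyGetD_natCast, getD_append_length]
      have hrest := ih (pre ++ [prev]) y
      rw [show ((pre ++ [prev]).length + 1 : Nat) = pre.length + 1 + 1 from by simp] at hrest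
      rw [hgetk, hgetk1, hre,
        show (((pre.length + 1 : Nat) : Int) + 1) = ((pre.length + 1 + 1 : Nat) : Int) from by push_cast; ring,
        hrest, breaksAux]
      by_cases hy : (y == prev) = true
      · rw [hy]; simp
      · rw [Bool.not_eq_true] at hy; rw [hy]; simp

-- the gap-cost sum over 0 :: breaks ++ [m] is the run-by-run total
theorem diffSum_breaksAux {α : Type} [BEq α] [LawfulBEq α] (i : Int) :
    ∀ (xs : List α) (prev : α) (c k : Nat), c < k →
      diffSum i ((c : Int) :: breaksAux prev xs k ++ [((k + xs.length : Nat) : Int)])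
        = bCostNat i ((k - c) + (xs.takeWhile (fun y => y == prev)).length)
          + bGroup i (xs.dropWhile (fun y => y == prev)) := by
  intro xs
  induction xs with
  | nil =>
      intro prev c k hck
      simp only [breaksAux, List.length_nil, Nat.add_zero,
        List.takeWhile_nil, List.dropWhile_nil]
      rw [show bGroup i ([] : List α) = 0 from by rw [bGroup]]
      simp [diffSum, List.zip, bCost_natSub i c k hck]
  | cons y ys ih =>
      intro prev c k hck
      by_cases hy : y = prev
      · subst hy
        simp only [breaksAux, beq_self_eq_true, if_pos, List.takeWhile_cons,
          List.dropWhile_cons]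
        have hend : ((k + (y :: ys).length : Nat) : Int) = (((k + 1) + ys.length : Nat) : Int) := by
          simp; omega
        rw [hend, ih y c (k + 1) (by omega)]
        simp only [List.length_cons]
        congr 2
        omega
      · have hby : (y == prev) = false := by simp [hy]
        simp only [breaksAux, hby, Bool.false_eq_true, if_false, List.takeWhile_cons,
          List.dropWhile_cons, List.cons_append]
        rw [diffSum_cons_cons, bCost_natSub i c k hck, ← List.cons_append]
        have hend : ((k + (y :: ys).length : Nat) : Int) = (((k + 1) + ys.length : Nat) : Int) := by
          simp; omega
        rw [hend, ih y k (k + 1) (by omega)]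
        rw [show bGroup i (y :: ys) = bCostNat i (1 + (ys.takeWhile (fun b => b == y)).length)
              + bGroup i (ys.dropWhile (fun b => b == y)) from by rw [bGroup]]
        simp only [Nat.add_sub_cancel_left, List.length_nil, Nat.add_zero]

theorem diffSum_eq_bGroup {α : Type} [BEq α] [LawfulBEq α] (i : Int) (x : α) (xs : List α) :
    diffSum i ((0 : Int) :: breaksAux x xs 1 ++ [(((x :: xs).length : Nat) : Int)])
      = bGroup i (x :: xs) := by
  have h := diffSum_breaksAux i xs x 0 1 (by omega)
  rw [show ((0 : Nat) : Int) = (0 : Int) from rfl] at h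
  rw [show (((x :: xs).length : Nat) : Int) = ((1 + xs.length : Nat) : Int) from by simp; omega]
  rw [h, show bGroup i (x :: xs) = bCostNat i (1 + (xs.takeWhile (fun y => y == x)).length)
        + bGroup i (xs.dropWhile (fun y => y == x)) from by rw [bGroup]]

-- ---- assembling the per-chunk-size equality ----

theorem solution_spec' : ∀ (s : String), solution s = solution_alt s := by
  intro s
  unfold solution solution_alt
  apply PySem.List.foldl_congr_mem
  intro acc i hi
  rw [PySem.List.mem_pyRange_one] at hi
  have hn : PySem.Str.len s = ((s.toList.length : Nat) : Int) := PySem.Str.len_eq s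
  have hipos : 0 < i := by omega
  dsimp only
  congr 1
  -- common chunk list L, indexed by Nat positions
  set n : Int := PySem.Str.len s with hns
  have hin : i ≤ n := by omega
  have hn0 : 0 ≤ n := by omega
  -- number of chunks
  set M : Nat := (n / i).toNat with hM
  have hMeq : (M : Int) = n / i := by
    rw [hM]; exact Int.toNat_of_nonneg (Int.ediv_nonneg hn0 (by omega))
  have hM1 : 1 ≤ M := by
    have : 1 ≤ n / i := by
      rw [Int.le_ediv_iff_mul_le hipos]; omega
    omega
  have hfd : PySem.Int.floordiv n i = (M : Int) := by
    rw [PySem.Int.floordiv_eq_ediv_of_pos hipos, hMeq]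
  -- the pyRange of chunk starts is range M mapped through (i * ·)
  have hrange : PySem.List.pyRange 0 (n - i + 1) i
      = (List.range M).map (fun (k : Nat) => i * (k : Int)) := by
    rw [PySem.List.pyRange_of_pos 0 (n - i + 1) hipos]
    rw [if_pos (by omega)]
    have h2 : ((n - i + 1 - 0 + i - 1) / i).toNat = M := by
      rw [show n - i + 1 - 0 + i - 1 = n from by ring]
    rw [h2]
    exact List.map_congr_left (fun a _ => by ring)
  set g : Nat → String := fun k => PySem.Str.slice s (some (i * (k : Int))) (some (i * (k : Int) + i)) with hg
  set L : List String := (List.range M).map g with hL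
  have hLlen : L.length = M := by rw [hL]; simp
  have hLget : ∀ (k : Nat), k < M → L.getD k "" = g k := by
    intro k hk
    rw [hL, List.getD_eq_getElem?_getD, List.getElem?_map, List.getElem?_range hk]
    rfl
  obtain ⟨x, xs, hcons⟩ := List.exists_cons_of_ne_nil (l := L)
    (by rw [hL]; simp [List.range_eq_nil]; omega)
  -- ===== A side =====
  rw [PySem.List.foldl_append_singleton_eq_map
        (f := fun j => (PySem.Str.slice s (some j) (some (j + i))).toList), List.nil_append]
  have hAmap : (PySem.List.pyRange 0 (n - i + 1) i).map
        (fun j => (PySem.Str.slice s (some j) (some (j + i))).toList)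
      = L.map String.toList := by
    rw [hrange, hL, List.map_map, List.map_map]
    apply List.map_congr_left
    intro k _
    simp only [Function.comp_apply]
    rw [hg]
  rw [hAmap, hcons, List.map_cons]
  rw [foldA_inline i (xs.map String.toList) x.toList _]
  rw [walk_total, ← List.map_cons, bGroup_map String.toList toList_beq, List.length_map]
  -- ===== B side =====
  rw [hfd]
  have hBfilter : (PySem.List.pyRange 1 ((M : Int))).filter
        (fun k => !(PySem.Str.slice s (some (k * i)) (some ((k + 1) * i))
                    == PySem.Str.slice s (some ((k - 1) * i)) (some (k * i))))
      = breaksAux x xs 1 := by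
    have hstep1 : (PySem.List.pyRange 1 ((M : Int))).filter
          (fun k => !(PySem.Str.slice s (some (k * i)) (some ((k + 1) * i))
                      == PySem.Str.slice s (some ((k - 1) * i)) (some (k * i))))
        = (PySem.List.pyRange 1 ((M : Int))).filter
          (fun k => !(PySem.List.pyGetD L k "" == PySem.List.pyGetD L (k - 1) "")) := by
      apply List.filter_congr
      intro k hk
      rw [PySem.List.mem_pyRange_one] at hk
      obtain ⟨kn, rfl⟩ : ∃ m : Nat, k = (m : Int) := ⟨k.toNat, by omega⟩
      have hkn : 1 ≤ kn ∧ kn < M := by omega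
      have hgk : PySem.List.pyGetD L ((kn : Nat) : Int) "" = g kn := by
        rw [PySem.List.pyGetD_natCast, hLget kn hkn.2]
      have hgk1 : PySem.List.pyGetD L (((kn : Nat) : Int) - 1) "" = g (kn - 1) := by
        rw [show ((kn : Nat) : Int) - 1 = ((kn - 1 : Nat) : Int) from by omega,
          PySem.List.pyGetD_natCast, hLget (kn - 1) (by omega)]
      rw [hgk, hgk1, hg]
      simp only
      rw [show ((kn : Int)) * i = i * (kn : Int) from by ring,
        show ((kn : Int) + 1) * i = i * (kn : Int) + i from by ring,
        show ((kn : Int) - 1) * i = i * (((kn - 1 : Nat)) : Int) from by rw [Nat.cast_sub hkn.1]; ring,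
        show i * (kn : Int) = i * (((kn - 1 : Nat)) : Int) + i from by rw [Nat.cast_sub hkn.1]; ring]
    rw [hstep1, show ((M : Int)) = (((x :: xs).length : Nat) : Int) from by rw [← hcons, hLlen], hcons]
    have := filter_eq_breaksAux ("" : String) xs [] x
    simpa using this
  rw [hBfilter, PySem.List.slice_from_one]
  have hsum : (((((0 : Int) :: breaksAux x xs 1 ++ [(M : Int)]).zip
        (((0 : Int) :: breaksAux x xs 1 ++ [(M : Int)]).tail)).map
          (fun p => bCost i (p.2 - p.1))).sum)
      = diffSum i ((0 : Int) :: breaksAux x xs 1 ++ [(M : Int)]) := rfl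
  rw [hsum, show (M : Int) = (((x :: xs).length : Nat) : Int) from by rw [← hcons, hLlen],
    diffSum_eq_bGroup, ← hcons, hLlen]

-- ===== VERDICT (by name: the statement is the Claim_ definition above) =====
theorem solution_spec : Claim_equal_solution := by
  intro s _
  unfold Spec_solution
  exact solution_spec' s
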